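-- pv_equiv track=rewrite | github.com/leventg/bellman-ford | graph_c.py | __retrace_negative_loop
-- ===== SOURCE A (Python) =====
-- def __retrace_negative_loop(p, start):
--     arbitrage_loop = [start]
--     next_node = start
--     while next_node is not None:
--         next_node = p.get(next_node)
--         if next_node is not None and next_node not in arbitrage_loop:
--             arbitrage_loop.append(next_node)
--         elif next_node is not None:
--             arbitrage_loop.append(next_node)
--             arbitrage_loop = arbitrage_loop[arbitrage_loop.index(next_node):]
--             return arbitrage_loop
--     return None
-- ===== SOURCE B (Python) =====
-- def __retrace_negative_loop(p, start):
--     # Floyd's tortoise-and-hare cycle detection on the predecessor map: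
--     # O(1) extra space, no path list / membership scans.
--     # Phase 1: find a meeting point inside the cycle (or hit a dead end -> None).
--     slow = start
--     fast = start
--     while True:
--         step = p.get(fast)
--         if step is None:
--             return None
--         fast = p.get(step)
--         if fast is None:
--             return None
--         slow = p.get(slow)
--         if slow is None:
--             return None
--         if slow == fast:
--             break
--     # Phase 2: find the cycle entry node mu.
--     u = start
--     v = slow
--     while u != v:
--         u = p.get(u)
--         v = p.get(v)
--         if u is None or v is None:
--             return None
--     mu = u
--     # Phase 3: walk once around the cycle, then close it with mu.
--     cycle = [mu]
--     node = p.get(mu)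
--     while node is not None and node != mu:
--         cycle.append(node)
--         node = p.get(node)
--     if node is None:
--         return None
--     return cycle + [mu]
-- ===== Notes on version B (the rewrite author's own statement) =====
-- stated objective: alternative
-- what changed: B replaces A's grow-a-path-list-and-rescan loop (membership test and final .index/slice over the accumulated path) by Floyd's tortoise-and-hare: two pointers detect the cycle in O(1) extra space, a second pass locates the entry node, and a third pass walks once around the cycle to emit it.
import Mathlib
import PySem

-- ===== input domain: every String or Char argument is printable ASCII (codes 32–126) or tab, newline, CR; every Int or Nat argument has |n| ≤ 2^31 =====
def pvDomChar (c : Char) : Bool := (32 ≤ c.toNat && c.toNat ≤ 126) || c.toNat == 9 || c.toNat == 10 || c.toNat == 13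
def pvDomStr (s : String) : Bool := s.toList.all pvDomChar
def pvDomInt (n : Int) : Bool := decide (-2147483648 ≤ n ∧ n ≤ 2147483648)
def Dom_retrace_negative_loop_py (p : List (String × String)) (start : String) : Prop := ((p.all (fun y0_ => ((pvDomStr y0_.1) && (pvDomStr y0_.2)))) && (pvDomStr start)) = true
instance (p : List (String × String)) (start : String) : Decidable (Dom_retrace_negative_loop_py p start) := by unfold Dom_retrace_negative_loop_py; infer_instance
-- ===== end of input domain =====

-- B replaces A's grow-a-path-and-rescan loop by Floyd's tortoise-and-hare cycle
-- detection on the predecessor map (two pointers, O(1) extra space; objective: alternative).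

-- ===== PORT A =====
-- the while loop of A: state = (next_node, arbitrage_loop); terminates because each
-- continuing step appends a fresh node drawn from p's values
def pvALoop (p : List (String × String)) (nextNode : String) (loopAcc : List String) :
    Option (List String) :=
  match h : (PySem.Dict.mk p).get? nextNode with   -- next_node = p.get(next_node)
  | none => none                                   -- loop falls out: return None
  | some nn =>
    if hmem : nn ∈ loopAcc then
      -- arbitrage_loop.append(next_node); arbitrage_loop[arbitrage_loop.index(next_node):]
      let al := loopAcc ++ [nn]
      some (PySem.List.slice al (some (((PySem.List.index? al nn).getD 0 : Nat) : Int)) none)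
    else
      pvALoop p nn (loopAcc ++ [nn])               -- arbitrage_loop.append(next_node)
termination_by ((p.map Prod.snd).toFinset \ loopAcc.toFinset).card
decreasing_by
  have hv : nn ∈ p.map Prod.snd :=
    List.mem_map_of_mem (PySem.Dict.mem_items_of_get?_eq_some _ h)
  apply Finset.card_lt_card
  refine (Finset.ssubset_iff_of_subset ?_).mpr ⟨nn, ?_, ?_⟩
  · intro x hx
    simp only [Finset.mem_sdiff, List.mem_toFinset, List.mem_append, List.mem_singleton,
      not_or] at hx ⊢
    exact ⟨hx.1, hx.2.1⟩
  · simp only [Finset.mem_sdiff, List.mem_toFinset]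
    exact ⟨hv, hmem⟩
  · intro hx
    simp at hx

def retrace_negative_loop_py (p : List (String × String)) (start : String) :
    Option (List String) :=
  pvALoop p start [start]                          -- arbitrage_loop = [start]; next_node = start

-- ===== PORT B =====
-- Floyd's tortoise-and-hare on f = p.get.  Each phase is the obvious recursion on its
-- while-loop state; the fuel argument is ONLY a totality guard (the proofs show that
-- p.length + 2 steps always suffice), it adds no behaviour of its own.

-- Phase 1: slow moves one step, fast two; meet inside the cycle or hit a dead end.
def pvFloyd1 (f : String → Option String) : Nat → String → String → Option String
  | 0, _, _ => none
  | fuel+1, slow, fast =>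
    match f fast with
    | none => none                                 -- step = p.get(fast); if step is None: return None
    | some step =>
      match f step with
      | none => none                               -- fast = p.get(step); if fast is None: return None
      | some fast' =>
        match f slow with
        | none => none                             -- slow = p.get(slow); if slow is None: return None
        | some slow' =>
          if slow' == fast' then some slow'        -- if slow == fast: break
          else pvFloyd1 f fuel slow' fast'

-- Phase 2: restart one pointer from start; single steps until they coincide at the entry mu.
def pvFloyd2 (f : String → Option String) : Nat → String → String → Option String
  | 0, _, _ => none
  | fuel+1, u, v =>
    if u == v then some u                          -- while u != v:
    else
      match f u, f v with
      | some u', some v' => pvFloyd2 f fuel u' v'  -- u = p.get(u); v = p.get(v)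
      | _, _ => none                               -- if u is None or v is None: return None

-- Phase 3: walk once around the cycle from mu, then close it with mu.
def pvFloyd3 (f : String → Option String) (mu : String) :
    Nat → List String → Option String → Option (List String)
  | 0, _, _ => none
  | fuel+1, cyc, node =>
    match node with
    | none => none                                 -- if node is None: return None
    | some n =>
      if n == mu then some (cyc ++ [mu])           -- while ... node != mu ; return cycle + [mu]
      else pvFloyd3 f mu fuel (cyc ++ [n]) (f n)   -- cycle.append(node); node = p.get(node)

def retrace_negative_loop_py_alt (p : List (String × String)) (start : String) :
    Option (List String) :=
  let f : String → Option String := fun s => (PySem.Dict.mk p).get? s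
  let fuel := p.length + 2
  match pvFloyd1 f fuel start start with
  | none => none
  | some meet =>
    match pvFloyd2 f fuel start meet with
    | none => none
    | some mu => pvFloyd3 f mu fuel [mu] (f mu)

-- ===== PRECONDITION & SPEC =====
def Spec_retrace_negative_loop_py (p : List (String × String)) (start : String) (out : Option (List String)) : Prop := out = retrace_negative_loop_py_alt p start
instance (p : List (String × String)) (start : String) (out : Option (List String)) : Decidable (Spec_retrace_negative_loop_py p start out) := by unfold Spec_retrace_negative_loop_py; infer_instance

-- ===== CLAIM (what is proved, stated in full; the proofs are below) =====
def Claim_equal_retrace_negative_loop_py : Prop := ∀ (p : List (String × String)) (start : String), Dom_retrace_negative_loop_py p start → Spec_retrace_negative_loop_py p start (retrace_negative_loop_py p start)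

-- ===== LEMMAS AND PROOFS =====

-- The orbit start, p.get(start), p.get²(start), … as a partial sequence.
def pvOrbit (f : String → Option String) (start : String) : Nat → Option String
  | 0 => some start
  | n+1 => (pvOrbit f start n).bind f

theorem pvOrbit_shift (f : String → Option String) (start : String) (i j : Nat)
    (h : pvOrbit f start i = pvOrbit f start j) :
    ∀ k, pvOrbit f start (i+k) = pvOrbit f start (j+k) := by
  intro k
  induction k with
  | zero => simpa using h
  | succ k ih =>
    show (pvOrbit f start (i+k)).bind f = (pvOrbit f start (j+k)).bind f
    rw [ih]

-- In a run that dies at step N, all earlier values are distinct.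
theorem pvOrbit_inj_of_none (f : String → Option String) (start : String) {N i j : Nat}
    (hNone : pvOrbit f start N = none)
    (hmin : ∀ m, m < N → pvOrbit f start m ≠ none)
    (hij : i < j) (hjN : j < N) :
    pvOrbit f start i ≠ pvOrbit f start j := by
  intro h
  have := pvOrbit_shift f start i j h (N - j)
  rw [show j + (N - j) = N by omega, hNone] at this
  exact hmin (i + (N - j)) (by omega) this

-- ---------- total-orbit (cycle) machinery ----------
-- x : Nat → String a total run of f (hx).

theorem pvShiftX (f : String → Option String) (x : Nat → String)
    (hx : ∀ n, f (x n) = some (x (n+1))) {i j : Nat} (h : x i = x j) :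
    ∀ k, x (i+k) = x (j+k) := by
  intro k
  induction k with
  | zero => simpa using h
  | succ k ih =>
    have h1 := hx (i+k)
    have h2 := hx (j+k)
    rw [ih, h2] at h1
    exact (Option.some_injective _ h1.symm : _)

theorem pvPerStep (f : String → Option String) (x : Nat → String)
    (hx : ∀ n, f (x n) = some (x (n+1))) {mu lam : Nat} (h0 : x (mu+lam) = x mu) :
    ∀ n, mu ≤ n → x (n + lam) = x n := by
  intro n hn
  have := pvShiftX f x hx h0 (n - mu)
  rw [show mu + lam + (n - mu) = n + lam by omega, show mu + (n - mu) = n by omega] at this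
  exact this

theorem pvPer (f : String → Option String) (x : Nat → String)
    (hx : ∀ n, f (x n) = some (x (n+1))) {mu lam : Nat} (h0 : x (mu+lam) = x mu) :
    ∀ n, mu ≤ n → ∀ k, x (n + k*lam) = x n := by
  intro n hn k
  induction k with
  | zero => simp
  | succ k ih =>
    have := pvPerStep f x hx h0 (n + k*lam) (by omega)
    rw [show n + (k+1)*lam = n + k*lam + lam by ring] at *
    rw [this, ih]

-- First repeat: every equality x i = x j (i < j) happens at or after mu and at a
-- multiple of lam apart.
theorem pvInj (f : String → Option String) (x : Nat → String)
    (hx : ∀ n, f (x n) = some (x (n+1))) {mu lam : Nat}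
    (h0 : x (mu+lam) = x mu) (hlam_pos : 0 < lam)
    (hmu_min : ∀ i l, i < mu → 0 < l → x (i+l) ≠ x i)
    (hlam_min : ∀ l, 0 < l → l < lam → x (mu+l) ≠ x mu) :
    ∀ i j, i < j → x i = x j → mu ≤ i ∧ lam ∣ (j - i) := by
  intro i j hij hxij
  have hmui : mu ≤ i := by
    by_contra hlt
    exact hmu_min i (j - i) (by omega) (by omega)
      (by rw [show i + (j-i) = j by omega]; exact hxij.symm)
  refine ⟨hmui, ?_⟩
  by_contra hndvd
  have hq := Nat.div_add_mod (j - i) lam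
  rw [Nat.mul_comm] at hq
  set q := (j - i) / lam with hqdef
  set r := (j - i) % lam with hrdef
  have hrpos : 0 < r :=
    Nat.pos_of_ne_zero (fun h => hndvd (Nat.dvd_of_mod_eq_zero (by rw [← hrdef, h])))
  have hrlt : r < lam := Nat.mod_lt _ hlam_pos
  -- x i = x (i + r)
  have hper := pvPer f x hx h0 (i + r) (by omega) q
  rw [show i + r + q * lam = j by omega] at hper
  have hir : x i = x (i + r) := hxij.trans hper
  -- push the repeat back to mu: x (mu + r) = x mu
  have hil : i ≤ i * lam := Nat.le_mul_of_pos_right i hlam_pos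
  have hk := pvShiftX f x hx hir (mu + i*lam - i)
  rw [show i + (mu + i*lam - i) = mu + i*lam by omega,
      show i + r + (mu + i*lam - i) = (mu + r) + i*lam by omega] at hk
  have e1 := pvPer f x hx h0 mu le_rfl i
  have e2 := pvPer f x hx h0 (mu + r) (by omega) i
  rw [e1, e2] at hk
  exact hlam_min r hrpos hrlt hk.symm

theorem pvInjLt (f : String → Option String) (x : Nat → String)
    (hx : ∀ n, f (x n) = some (x (n+1))) {mu lam : Nat}
    (h0 : x (mu+lam) = x mu) (hlam_pos : 0 < lam)
    (hmu_min : ∀ i l, i < mu → 0 < l → x (i+l) ≠ x i)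
    (hlam_min : ∀ l, 0 < l → l < lam → x (mu+l) ≠ x mu) :
    ∀ i j, i < j → j < mu + lam → x i ≠ x j := by
  intro i j hij hjlt h
  obtain ⟨hmui, hdvd⟩ := pvInj f x hx h0 hlam_pos hmu_min hlam_min i j hij h
  have : lam ≤ j - i := Nat.le_of_dvd (by omega) hdvd
  omega

-- ---------- list bookkeeping ----------

theorem pvRangeMapSplit (x : Nat → String) (m n : Nat) (h : m ≤ n) :
    (List.range n).map x
      = (List.range m).map x ++ (List.range (n-m)).map (fun t => x (m+t)) := by
  conv_lhs => rw [show n = m + (n-m) by omega]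
  rw [List.range_add, List.map_append, List.map_map]
  rfl

theorem pvIndexAt (x : Nat → String) (v : String) (m n : Nat) (hm : m < n)
    (hv : x m = v) (hprev : ∀ i, i < m → x i ≠ v) :
    PySem.List.index? ((List.range n).map x) v = some m := by
  subst hv
  rw [PySem.List.index?_eq_some_iff]
  refine ⟨(List.range m).map x, (List.range (n-m-1)).map (fun t => x (m+1+t)), ?_, by simp, ?_⟩
  · rw [pvRangeMapSplit x m n (le_of_lt hm),
        show n - m = (n-m-1) + 1 by omega, List.range_succ_eq_map, List.map_cons, List.map_map]
    refine congrArg₂ (· ++ ·) rfl (congrArg₂ List.cons (by simp) ?_)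
    refine List.map_congr_left (fun t ht => ?_)
    show x (m + (t+1)) = x (m+1+t)
    exact congrArg x (by omega)
  · simp only [List.mem_map, List.mem_range]
    rintro ⟨i, hi, hxi⟩
    exact hprev i hi hxi

-- ---------- A's loop in the total case ----------

theorem pvALoop_none' (p : List (String × String)) (n : String) (l : List String)
    (h : (PySem.Dict.mk p).get? n = none) : pvALoop p n l = none := by
  rw [pvALoop.eq_def]
  split
  · rfl
  · next nn heq => rw [h] at heq; cases heq

theorem pvALoop_found (p : List (String × String)) (n : String) (l : List String) (nn : String)
    (h : (PySem.Dict.mk p).get? n = some nn) (hm : nn ∈ l) :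
    pvALoop p n l = some (PySem.List.slice (l ++ [nn])
      (some (((PySem.List.index? (l ++ [nn]) nn).getD 0 : Nat) : Int)) none) := by
  rw [pvALoop.eq_def]
  split
  · next heq => rw [h] at heq; cases heq
  · next nn' heq =>
    rw [h] at heq
    injection heq with e
    subst e
    rw [dif_pos hm]

theorem pvALoop_step (p : List (String × String)) (n : String) (l : List String) (nn : String)
    (h : (PySem.Dict.mk p).get? n = some nn) (hm : nn ∉ l) :
    pvALoop p n l = pvALoop p nn (l ++ [nn]) := by
  rw [pvALoop.eq_def]
  split
  · next heq => rw [h] at heq; cases heq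
  · next nn' heq =>
    rw [h] at heq
    injection heq with e
    subst e
    rw [dif_neg hm]

-- A, in the total case, returns the cycle from mu closed with mu.
theorem pvARun (p : List (String × String)) (x : Nat → String)
    (hx : ∀ n, (PySem.Dict.mk p).get? (x n) = some (x (n+1))) {mu lam : Nat}
    (h0 : x (mu+lam) = x mu) (hlam_pos : 0 < lam)
    (hmu_min : ∀ i l, i < mu → 0 < l → x (i+l) ≠ x i)
    (hlam_min : ∀ l, 0 < l → l < lam → x (mu+l) ≠ x mu) :
    ∀ d k, k + d + 1 = mu + lam →
      pvALoop p (x k) ((List.range (k+1)).map x)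
        = some ((List.range lam).map (fun t => x (mu+t)) ++ [x mu]) := by
  have hinj := pvInjLt _ x hx h0 hlam_pos hmu_min hlam_min
  intro d
  induction d with
  | zero =>
    intro k hk
    have hk1 : k + 1 = mu + lam := by omega
    have hstep : (PySem.Dict.mk p).get? (x k) = some (x mu) := by
      rw [hx k, hk1, h0]
    have hmem : x mu ∈ (List.range (k+1)).map x := by
      refine List.mem_map.mpr ⟨mu, List.mem_range.mpr (by omega), rfl⟩
    rw [pvALoop_found p (x k) _ (x mu) hstep hmem]
    have hidx : PySem.List.index? ((List.range (k+1)).map x ++ [x mu]) (x mu) = some mu := by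
      rw [PySem.List.index?_append_of_mem _ hmem]
      exact pvIndexAt x (x mu) mu (k+1) (by omega) rfl
        (fun i hi => hinj i mu hi (by omega))
    rw [hidx]
    simp only [Option.getD_some]
    rw [PySem.List.slice_from_natCast]
    congr 1
    rw [List.drop_append_of_le_length (by simp; omega)]
    rw [pvRangeMapSplit x mu (k+1) (by omega)]
    rw [List.drop_append_of_le_length (by simp), show k + 1 - mu = lam by omega]
    simp
  | succ d ih =>
    intro k hk
    have hk1 : k + 1 < mu + lam := by omega
    have hstep : (PySem.Dict.mk p).get? (x k) = some (x (k+1)) := hx k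
    have hnm : x (k+1) ∉ (List.range (k+1)).map x := by
      simp only [List.mem_map, List.mem_range]
      rintro ⟨i, hi, hxi⟩
      exact hinj i (k+1) hi hk1 hxi
    rw [pvALoop_step p (x k) _ (x (k+1)) hstep hnm]
    have : (List.range (k+1)).map x ++ [x (k+1)] = (List.range (k+2)).map x := by
      rw [List.range_succ (n := k+1), List.map_append]; rfl
    rw [this]
    exact ih (k+1) (by omega)

-- A, in the dying case, returns none.
theorem pvARunNone (p : List (String × String)) (x : Nat → String) (N : Nat)
    (hx : ∀ n, n + 1 < N → (PySem.Dict.mk p).get? (x n) = some (x (n+1)))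
    (hlast : (PySem.Dict.mk p).get? (x (N-1)) = none)
    (hinj : ∀ i j, i < j → j < N → x i ≠ x j) (hN : 0 < N) :
    ∀ d k, k + d + 1 = N → pvALoop p (x k) ((List.range (k+1)).map x) = none := by
  intro d
  induction d with
  | zero =>
    intro k hk
    exact pvALoop_none' p (x k) _ (by rw [show k = N - 1 by omega] at *; exact hlast)
  | succ d ih =>
    intro k hk
    have hstep : (PySem.Dict.mk p).get? (x k) = some (x (k+1)) := hx k (by omega)
    have hnm : x (k+1) ∉ (List.range (k+1)).map x := by
      simp only [List.mem_map, List.mem_range]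
      rintro ⟨i, hi, hxi⟩
      exact hinj i (k+1) hi (by omega) hxi
    rw [pvALoop_step p (x k) _ (x (k+1)) hstep hnm]
    have : (List.range (k+1)).map x ++ [x (k+1)] = (List.range (k+2)).map x := by
      rw [List.range_succ (n := k+1), List.map_append]; rfl
    rw [this]
    exact ih (k+1) (by omega)

-- ---------- Floyd's three phases, total case ----------

theorem pvFloyd1Run (f : String → Option String) (x : Nat → String)
    (hx : ∀ n, f (x n) = some (x (n+1))) {M : Nat}
    (hM : x M = x (2*M))
    (hMmin : ∀ m, 0 < m → m < M → x m ≠ x (2*m)) :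
    ∀ fuel k, k < M → M ≤ k + fuel →
      pvFloyd1 f fuel (x k) (x (2*k)) = some (x M) := by
  intro fuel
  induction fuel with
  | zero => intro k h1 h2; omega
  | succ fuel ih =>
    intro k h1 h2
    show (match f (x (2*k)) with
      | none => none
      | some step => match f step with
        | none => none
        | some fast' => match f (x k) with
          | none => none
          | some slow' => if slow' == fast' then some slow' else pvFloyd1 f fuel slow' fast')
      = some (x M)
    rw [hx (2*k)]
    simp only
    rw [hx (2*k+1)]
    simp only
    rw [hx k]
    simp only
    have h22 : 2*k+1+1 = 2*(k+1) := by ring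
    rw [h22]
    by_cases heq : k + 1 = M
    · rw [if_pos (by rw [beq_iff_eq, heq]; exact hM)]
      rw [heq]
    · rw [if_neg (by rw [beq_iff_eq]; exact hMmin (k+1) (by omega) (by omega))]
      exact ih (k+1) (by omega) (by omega)

theorem pvFloyd2Run (f : String → Option String) (x : Nat → String)
    (hx : ∀ n, f (x n) = some (x (n+1))) {mu lam M : Nat}
    (h0 : x (mu+lam) = x mu)
    (hmu_min : ∀ i l, i < mu → 0 < l → x (i+l) ≠ x i)
    (hMdvd : lam ∣ M) (hMpos : 0 < M) :
    ∀ fuel j, j ≤ mu → mu < j + fuel →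
      pvFloyd2 f fuel (x j) (x (j+M)) = some (x mu) := by
  intro fuel
  induction fuel with
  | zero => intro j h1 h2; omega
  | succ fuel ih =>
    intro j h1 h2
    show (if x j == x (j+M) then some (x j)
      else match f (x j), f (x (j+M)) with
        | some u', some v' => pvFloyd2 f fuel u' v'
        | _, _ => none) = some (x mu)
    by_cases heq : j = mu
    · subst heq
      have hper : x (j + M) = x j := by
        obtain ⟨c, rfl⟩ := hMdvd
        have h := pvPer f x hx h0 j le_rfl c
        rw [Nat.mul_comm c lam] at h
        exact h
      rw [if_pos (by rw [beq_iff_eq, hper])]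
    · have hjlt : j < mu := by omega
      have hne : ¬ (x j = x (j+M)) := by
        intro h
        exact hmu_min j M hjlt hMpos h.symm
      rw [if_neg (by rw [beq_iff_eq]; exact hne)]
      rw [hx j, hx (j+M)]
      simp only
      rw [show j + M + 1 = (j+1) + M by omega]
      exact ih (j+1) (by omega) (by omega)

theorem pvFloyd3Run (f : String → Option String) (x : Nat → String)
    (hx : ∀ n, f (x n) = some (x (n+1))) {mu lam : Nat}
    (h0 : x (mu+lam) = x mu) (hlam_pos : 0 < lam)
    (hlam_min : ∀ l, 0 < l → l < lam → x (mu+l) ≠ x mu) :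
    ∀ fuel i, 0 < i → i ≤ lam → lam < i + fuel →
      pvFloyd3 f (x mu) fuel ((List.range i).map (fun t => x (mu+t))) (some (x (mu+i)))
        = some ((List.range lam).map (fun t => x (mu+t)) ++ [x mu]) := by
  intro fuel
  induction fuel with
  | zero => intro i h1 h2 h3; omega
  | succ fuel ih =>
    intro i h1 h2 h3
    show (if x (mu+i) == x mu
        then some ((List.range i).map (fun t => x (mu+t)) ++ [x mu])
        else pvFloyd3 f (x mu) fuel ((List.range i).map (fun t => x (mu+t)) ++ [x (mu+i)])
          (f (x (mu+i))))
      = some ((List.range lam).map (fun t => x (mu+t)) ++ [x mu])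
    by_cases heq : i = lam
    · subst heq
      rw [if_pos (by rw [beq_iff_eq]; exact h0)]
    · rw [if_neg (by rw [beq_iff_eq]; exact hlam_min i h1 (by omega))]
      rw [hx (mu+i)]
      have hacc : (List.range i).map (fun t => x (mu+t)) ++ [x (mu+i)]
          = (List.range (i+1)).map (fun t => x (mu+t)) := by
        rw [List.range_succ (n := i), List.map_append]; rfl
      rw [hacc, show mu + i + 1 = mu + (i+1) from rfl]
      exact ih (i+1) (by omega) (by omega) (by omega)

-- ---------- the two cases of the main theorem ----------

theorem pvTotalCase (p : List (String × String)) (start : String)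
    (htot : ∀ n, (pvOrbit (fun s => (PySem.Dict.mk p).get? s) start n).isSome) :
    retrace_negative_loop_py p start = retrace_negative_loop_py_alt p start := by
  classical
  set f : String → Option String := fun s => (PySem.Dict.mk p).get? s with hf
  set x : Nat → String := fun n => (pvOrbit f start n).get (htot n) with hxdef
  have hsome : ∀ n, pvOrbit f start n = some (x n) := fun n => (Option.some_get (htot n)).symm
  have hx0 : x 0 = start := by
    have := hsome 0
    simp [pvOrbit] at this
    exact this.symm
  have hx : ∀ n, f (x n) = some (x (n+1)) := by
    intro n
    have h1 : pvOrbit f start (n+1) = (pvOrbit f start n).bind f := rfl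
    rw [hsome n, hsome (n+1)] at h1
    simpa using h1.symm
  -- values live in a finite set
  have hvals : ∀ n, x (n+1) ∈ p.map Prod.snd := by
    intro n
    exact List.mem_map_of_mem (PySem.Dict.mem_items_of_get?_eq_some _ (hx n))
  have hmemT : ∀ n, x n ∈ start :: p.map Prod.snd := by
    intro n
    cases n with
    | zero => rw [hx0]; exact List.mem_cons_self
    | succ n => exact List.mem_cons_of_mem _ (hvals n)
  -- pigeonhole: some repeat exists
  have hrep : ∃ i l, 0 < l ∧ x (i+l) = x i := by
    set L := (start :: p.map Prod.snd).length with hL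
    have hmaps : ∀ n ∈ Finset.range (L+1), x n ∈ (start :: p.map Prod.snd).toFinset := by
      intro n _
      exact List.mem_toFinset.mpr (hmemT n)
    have hcard : (start :: p.map Prod.snd).toFinset.card < (Finset.range (L+1)).card := by
      rw [Finset.card_range]
      exact lt_of_le_of_lt (List.toFinset_card_le _) (by omega)
    obtain ⟨a, _, b, _, hab, hxab⟩ :=
      Finset.exists_ne_map_eq_of_card_lt_of_maps_to hcard hmaps
    rcases Nat.lt_or_ge a b with h | h
    · exact ⟨a, b - a, by omega, by rw [show a + (b-a) = b by omega]; exact hxab.symm⟩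
    · have h' : b < a := by omega
      exact ⟨b, a - b, by omega, by rw [show b + (a-b) = a by omega]; exact hxab⟩
  -- mu and lam
  have hP : ∃ i, ∃ l, 0 < l ∧ x (i+l) = x i := hrep
  set mu := Nat.find hP with hmu
  obtain ⟨lam0, hlam0pos, hlam0⟩ := Nat.find_spec hP
  rw [← hmu] at hlam0
  have hQ : ∃ l, 0 < l ∧ x (mu+l) = x mu := ⟨lam0, hlam0pos, hlam0⟩
  set lam := Nat.find hQ with hlam
  obtain ⟨hlam_pos, h0⟩ := Nat.find_spec hQ
  rw [← hlam] at hlam_pos h0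
  have hmu_min : ∀ i l, i < mu → 0 < l → x (i+l) ≠ x i := by
    intro i l hi hl hne
    exact Nat.find_min hP hi ⟨l, hl, hne⟩
  have hlam_min : ∀ l, 0 < l → l < lam → x (mu+l) ≠ x mu := by
    intro l hl hllam hne
    exact Nat.find_min hQ hllam ⟨hl, hne⟩
  have hinj := pvInjLt f x hx h0 hlam_pos hmu_min hlam_min
  -- size bound: mu + lam ≤ p.length + 1
  have hbound : mu + lam ≤ p.length + 1 := by
    have hinjOn : Set.InjOn x (Finset.range (mu+lam)) := by
      intro a ha b hb hab
      simp only [Finset.coe_range, Set.mem_Iio] at ha hb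
      by_contra hne
      rcases Nat.lt_or_ge a b with h | h
      · exact hinj a b h hb hab
      · exact hinj b a (by omega) ha hab.symm
    have hmaps : ∀ a ∈ Finset.range (mu+lam), x a ∈ (start :: p.map Prod.snd).toFinset :=
      fun a _ => List.mem_toFinset.mpr (hmemT a)
    have hc := Finset.card_le_card_of_injOn x hmaps hinjOn
    rw [Finset.card_range] at hc
    have h2 := List.toFinset_card_le (start :: p.map Prod.snd)
    have h3 : (start :: p.map Prod.snd).length = p.length + 1 := by simp
    omega
  -- the meeting index M
  have hdm := Nat.div_add_mod mu lam
  have hml := Nat.mod_lt mu hlam_pos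
  have hstar_ge : mu ≤ lam * (mu / lam + 1) := by
    have h2 : lam * (mu/lam+1) = lam*(mu/lam) + lam := by ring
    omega
  have hstar : 0 < lam * (mu / lam + 1) ∧
      x (lam * (mu / lam + 1)) = x (2 * (lam * (mu / lam + 1))) := by
    refine ⟨by positivity, ?_⟩
    have h := pvPer f x hx h0 (lam * (mu / lam + 1)) hstar_ge (mu / lam + 1)
    rw [show lam * (mu/lam+1) + (mu/lam+1) * lam = 2 * (lam * (mu/lam+1)) by ring] at h
    exact h.symm
  have hMex : ∃ m, 0 < m ∧ x m = x (2*m) := ⟨_, hstar⟩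
  set M := Nat.find hMex with hM
  obtain ⟨hMpos, hMeet⟩ := Nat.find_spec hMex
  rw [← hM] at hMpos hMeet
  have hMmin : ∀ m, 0 < m → m < M → x m ≠ x (2*m) := by
    intro m h1 h2 hne
    exact Nat.find_min hMex h2 ⟨h1, hne⟩
  have hMle : M ≤ mu + lam := by
    have h1 : M ≤ lam * (mu / lam + 1) := Nat.find_min' hMex hstar
    have h2 : lam * (mu/lam+1) = lam*(mu/lam) + lam := by ring
    omega
  obtain ⟨hmuM, hMdvd⟩ := pvInj f x hx h0 hlam_pos hmu_min hlam_min M (2*M) (by omega) hMeet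
  have hMdvd' : lam ∣ M := by
    have : 2*M - M = M := by omega
    rwa [this] at hMdvd
  -- assemble B
  have hfuel : mu + lam ≤ p.length + 2 := by omega
  have hB : retrace_negative_loop_py_alt p start
      = some ((List.range lam).map (fun t => x (mu+t)) ++ [x mu]) := by
    show (match pvFloyd1 f (p.length+2) start start with
      | none => none
      | some meet => match pvFloyd2 f (p.length+2) start meet with
        | none => none
        | some m => pvFloyd3 f m (p.length+2) [m] (f m)) = _
    have h1 : pvFloyd1 f (p.length+2) start start = some (x M) := by
      have := pvFloyd1Run f x hx hMeet hMmin (p.length+2) 0 (by omega) (by omega)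
      simpa [hx0] using this
    rw [h1]
    simp only
    have h2 : pvFloyd2 f (p.length+2) start (x M) = some (x mu) := by
      have := pvFloyd2Run f x hx h0 hmu_min hMdvd' hMpos (p.length+2) 0 (by omega) (by omega)
      simpa [hx0] using this
    rw [h2]
    simp only
    have h3 : pvFloyd3 f (x mu) (p.length+2) [x mu] (f (x mu))
        = some ((List.range lam).map (fun t => x (mu+t)) ++ [x mu]) := by
      have := pvFloyd3Run f x hx h0 hlam_pos hlam_min (p.length+2) 1 (by omega) (by omega) (by omega)
      have hacc : (List.range 1).map (fun t => x (mu+t)) = [x mu] := by simp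
      rw [hacc] at this
      rw [hx mu]
      exact this
    exact h3
  -- assemble A
  have hA : retrace_negative_loop_py p start
      = some ((List.range lam).map (fun t => x (mu+t)) ++ [x mu]) := by
    show pvALoop p start [start] = _
    have h1 : ([start] : List String) = (List.range 1).map x := by simp [hx0]
    rw [h1, ← hx0]
    exact pvARun p x hx h0 hlam_pos hmu_min hlam_min (mu + lam - 1) 0 (by omega)
  rw [hA, hB]

theorem pvNoneCase (p : List (String × String)) (start : String)
    (hdies : ∃ n, pvOrbit (fun s => (PySem.Dict.mk p).get? s) start n = none) :
    retrace_negative_loop_py p start = retrace_negative_loop_py_alt p start := by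
  classical
  set f : String → Option String := fun s => (PySem.Dict.mk p).get? s with hf
  set N := Nat.find hdies with hN
  have hNone : pvOrbit f start N = none := Nat.find_spec hdies
  have hmin : ∀ m, m < N → pvOrbit f start m ≠ none := fun m hm => Nat.find_min hdies hm
  have hNpos : 0 < N := by
    rcases Nat.eq_zero_or_pos N with h | h
    · rw [h] at hNone; simp [pvOrbit] at hNone
    · exact h
  set x : Nat → String := fun n => (pvOrbit f start n).getD "" with hxdef
  have hsome : ∀ n, n < N → pvOrbit f start n = some (x n) := by
    intro n hn
    cases h : pvOrbit f start n with
    | none => exact absurd h (hmin n hn)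
    | some s => simp [hxdef, h]
  have hx0 : x 0 = start := by simp [hxdef, pvOrbit]
  have hx : ∀ n, n + 1 < N → f (x n) = some (x (n+1)) := by
    intro n hn
    have h1 : pvOrbit f start (n+1) = (pvOrbit f start n).bind f := rfl
    rw [hsome n (by omega), hsome (n+1) hn] at h1
    simpa using h1.symm
  have hlast : f (x (N-1)) = none := by
    have h1 : pvOrbit f start N = (pvOrbit f start (N-1)).bind f := by
      conv_lhs => rw [show N = (N-1)+1 by omega]
      rfl
    rw [hsome (N-1) (by omega), hNone] at h1
    simpa using h1.symm
  have hinj : ∀ i j, i < j → j < N → x i ≠ x j := by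
    intro i j hij hj h
    have : pvOrbit f start i = pvOrbit f start j := by
      rw [hsome i (by omega), hsome j hj, h]
    exact pvOrbit_inj_of_none f start hNone hmin hij hj this
  -- A returns none
  have hA : retrace_negative_loop_py p start = none := by
    show pvALoop p start [start] = none
    have h1 : ([start] : List String) = (List.range 1).map x := by simp [hx0]
    rw [h1, ← hx0]
    exact pvARunNone p x N hx hlast hinj hNpos (N-1) 0 (by omega)
  -- B: phase 1 returns none
  have hB1 : ∀ fuel k, 2*k + 1 ≤ N → pvFloyd1 f fuel (x k) (x (2*k)) = none := by
    intro fuel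
    induction fuel with
    | zero => intro k hk; rfl
    | succ fuel ih =>
      intro k hk
      show (match f (x (2*k)) with
        | none => none
        | some step => match f step with
          | none => none
          | some fast' => match f (x k) with
            | none => none
            | some slow' => if slow' == fast' then some slow' else pvFloyd1 f fuel slow' fast')
        = none
      by_cases h1 : 2*k + 1 = N
      · rw [show f (x (2*k)) = none by rw [show 2*k = N-1 by omega]; exact hlast]
      · have h1' : 2*k + 1 < N := by omega
        rw [hx (2*k) h1']
        simp only
        by_cases h2 : 2*k + 2 = N
        · rw [show f (x (2*k+1)) = none by rw [show 2*k+1 = N-1 by omega]; exact hlast]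
        · have h2' : 2*k + 2 < N := by omega
          rw [hx (2*k+1) (by omega)]
          simp only
          rw [hx k (by omega)]
          simp only
          rw [if_neg (by rw [beq_iff_eq]; exact hinj (k+1) (2*k+1+1) (by omega) (by omega))]
          rw [show 2*k+1+1 = 2*(k+1) by ring]
          exact ih (k+1) (by omega)
  have hB : retrace_negative_loop_py_alt p start = none := by
    show (match pvFloyd1 f (p.length+2) start start with
      | none => none
      | some meet => match pvFloyd2 f (p.length+2) start meet with
        | none => none
        | some m => pvFloyd3 f m (p.length+2) [m] (f m)) = none
    have h1 : pvFloyd1 f (p.length+2) start start = none := by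
      have := hB1 (p.length+2) 0 (by omega)
      simpa [hx0] using this
    rw [h1]
  rw [hA, hB]

-- ===== VERDICT (by name: the statement is the Claim_ definition above) =====
theorem retrace_negative_loop_py_spec : Claim_equal_retrace_negative_loop_py := by
  intro p start _
  show retrace_negative_loop_py p start = retrace_negative_loop_py_alt p start
  rcases Classical.em (∀ n, (pvOrbit (fun s => (PySem.Dict.mk p).get? s) start n).isSome) with h | h
  · exact pvTotalCase p start h
  · rw [not_forall] at h
    obtain ⟨n, hn⟩ := h
    exact pvNoneCase p start ⟨n, Option.not_isSome_iff_eq_none.mp (by simpa using hn)⟩
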